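-- pv_equiv track=rewrite | github.com/aplmikex/deduplication_mnbvc | utils.py | get_common_prefix_and_removed_list
-- ===== SOURCE A (Python) =====
-- def get_common_prefix_and_removed_list(strs):
--     if not strs:
--         return "", []
--     prefix = strs[0]
--     for s in strs:
--         while not s.startswith(prefix):
--             prefix = prefix[:-1]
--             if not prefix:
--                 return "", strs
--     return prefix, [s[len(prefix):] for s in strs]
-- ===== SOURCE B (Python) =====
-- def get_common_prefix_and_removed_list(strs):
--     if not strs:
--         return "", []
--     lo = min(strs)
--     hi = max(strs)
--     i = 0
--     while i < len(lo) and i < len(hi) and lo[i] == hi[i]: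
--         i += 1
--     return lo[:i], [s[i:] for s in strs]
-- ===== Notes on version B (the rewrite author's own statement) =====
-- stated objective: alternative
-- what changed: Replaces A's shrink-the-candidate-with-startswith nested loop over every string by taking the lexicographic minimum and maximum of the list and scanning only those two strings for their common prefix.
import Mathlib
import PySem

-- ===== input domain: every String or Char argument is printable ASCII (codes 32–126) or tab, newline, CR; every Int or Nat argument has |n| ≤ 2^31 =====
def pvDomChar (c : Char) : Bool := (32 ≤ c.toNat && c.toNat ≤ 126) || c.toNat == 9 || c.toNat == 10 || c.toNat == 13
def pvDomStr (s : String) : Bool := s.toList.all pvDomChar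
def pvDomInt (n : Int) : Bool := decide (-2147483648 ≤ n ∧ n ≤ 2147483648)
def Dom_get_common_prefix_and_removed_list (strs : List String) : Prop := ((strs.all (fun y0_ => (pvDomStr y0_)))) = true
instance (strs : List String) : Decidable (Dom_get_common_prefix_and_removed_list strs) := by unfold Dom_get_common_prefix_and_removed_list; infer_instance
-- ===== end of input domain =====

-- B replaces A's shrink-candidate-with-startswith nested loop by a scan of only the
-- lexicographic minimum and maximum of the list (alternative algorithm, same cost class).

-- ===== PORT A =====
-- inner `while not s.startswith(prefix): prefix = prefix[:-1]; if not prefix: return "", strs`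
-- (none = the early return "", strs)
def aInner (s p : List Char) : Option (List Char) :=
  if PySem.Chars.startswith s p then some p
  else
    let p' := PySem.List.slice p none (some (-1))
    if _hstop : p' = [] then none else aInner s p'
termination_by p.length
decreasing_by
  have h2 : p.dropLast ≠ [] := by
    simpa only [p', PySem.List.slice_to_neg_one] using _hstop
  simp only [PySem.List.slice_to_neg_one]
  cases p with
  | nil => exact absurd rfl h2
  | cons c cs => simp only [List.length_dropLast, List.length_cons]; omega

-- `for s in strs:` threading `prefix`
def aLoop (l : List String) (p : List Char) : Option (List Char) :=
  match l with
  | [] => some p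
  | s :: rest =>
    match aInner s.toList p with
    | none => none
    | some p' => aLoop rest p'

def get_common_prefix_and_removed_list (strs : List String) : String × List String :=
  match strs with
  | [] => ("", [])
  | s0 :: _ =>
    match aLoop strs s0.toList with
    | none => ("", strs)
    | some p =>
      (String.ofList p,
       strs.map (fun s => String.ofList (PySem.List.slice s.toList (some (p.length : Int)) none)))

-- ===== PORT B =====
-- `while i < len(lo) and i < len(hi) and lo[i] == hi[i]: i += 1`
def bLcpLen : List Char → List Char → Nat
  | a :: as, b :: bs => if a = b then bLcpLen as bs + 1 else 0
  | _, _ => 0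

def get_common_prefix_and_removed_list_alt (strs : List String) : String × List String :=
  match strs with
  | [] => ("", [])
  | s0 :: _ =>
    let lo := (PySem.List.min? strs (fun x => x)).getD s0
    let hi := (PySem.List.max? strs (fun x => x)).getD s0
    let i := bLcpLen lo.toList hi.toList
    (String.ofList (PySem.List.slice lo.toList none (some (i : Int))),
     strs.map (fun s => String.ofList (PySem.List.slice s.toList (some (i : Int)) none)))

-- ===== PRECONDITION & SPEC =====
def Spec_get_common_prefix_and_removed_list (strs : List String) (out : String × List String) : Prop := out = get_common_prefix_and_removed_list_alt strs
instance (strs : List String) (out : String × List String) : Decidable (Spec_get_common_prefix_and_removed_list strs out) := by unfold Spec_get_common_prefix_and_removed_list; infer_instance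

-- ===== CLAIM (what is proved, stated in full; the proofs are below) =====
def Claim_equal_get_common_prefix_and_removed_list : Prop := ∀ (strs : List String), Dom_get_common_prefix_and_removed_list strs → Spec_get_common_prefix_and_removed_list strs (get_common_prefix_and_removed_list strs)

-- ===== LEMMAS AND PROOFS =====

-- longest common prefix of two char lists (proof-side characterisation)
def pvLcp : List Char → List Char → List Char
  | a :: as, b :: bs => if a = b then a :: pvLcp as bs else []
  | _, _ => []

theorem pvLcp_nil_left (b : List Char) : pvLcp [] b = [] := by cases b <;> rfl

theorem pvLcp_prefix_left (a b : List Char) : pvLcp a b <+: a := by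
  induction a generalizing b with
  | nil => simp [pvLcp_nil_left]
  | cons c as ih =>
    cases b with
    | nil => simp [pvLcp]
    | cons d bs =>
      by_cases h : c = d
      · subst h; simp [pvLcp, List.cons_prefix_cons, ih]
      · simp [pvLcp, h]

theorem pvLcp_prefix_right (a b : List Char) : pvLcp a b <+: b := by
  induction a generalizing b with
  | nil => simp [pvLcp_nil_left]
  | cons c as ih =>
    cases b with
    | nil => simp [pvLcp]
    | cons d bs =>
      by_cases h : c = d
      · subst h; simp [pvLcp, List.cons_prefix_cons, ih]
      · simp [pvLcp, h]

theorem pvLcp_greatest {p a b : List Char} (ha : p <+: a) (hb : p <+: b) : p <+: pvLcp a b := by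
  induction p generalizing a b with
  | nil => simp
  | cons c ps ih =>
    obtain ⟨ta, rfl⟩ := ha
    obtain ⟨tb, rfl⟩ := hb
    simp only [List.cons_append, pvLcp]
    exact (List.cons_prefix_cons).mpr ⟨rfl, ih (List.prefix_append _ _) (List.prefix_append _ _)⟩

theorem pvLcp_of_prefix {p s : List Char} (h : p <+: s) : pvLcp p s = p := by
  have h1 := pvLcp_prefix_left p s
  have h2 := pvLcp_greatest (List.prefix_rfl (l := p)) h
  exact h1.eq_of_length (Nat.le_antisymm h1.length_le h2.length_le)

theorem pvLcp_dropLast {p s : List Char} (h : ¬ p <+: s) :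
    pvLcp p.dropLast s = pvLcp p s := by
  induction p generalizing s with
  | nil => simp at h
  | cons c ps ih =>
    cases s with
    | nil => cases ps <;> simp [pvLcp, pvLcp_nil_left, List.dropLast]
    | cons d ss =>
      by_cases hcd : c = d
      · subst hcd
        cases ps with
        | nil => exact absurd (by simp [List.cons_prefix_cons]) h
        | cons e ps' =>
          have h' : ¬ (e :: ps') <+: ss := by
            intro hp; exact h ((List.cons_prefix_cons).mpr ⟨rfl, hp⟩)
          simp only [List.dropLast_cons₂, pvLcp]
          rw [show (e :: ps').dropLast = List.dropLast (e :: ps') from rfl, ih h']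
      · cases ps with
        | nil => simp [pvLcp, List.dropLast, pvLcp_nil_left, hcd]
        | cons e ps' => simp [List.dropLast_cons₂, pvLcp, hcd]

theorem bLcpLen_eq (a b : List Char) : bLcpLen a b = (pvLcp a b).length := by
  induction a generalizing b with
  | nil => cases b <;> simp [bLcpLen, pvLcp]
  | cons c as ih =>
    cases b with
    | nil => simp [bLcpLen, pvLcp]
    | cons d bs =>
      by_cases h : c = d
      · subst h; simp [bLcpLen, pvLcp, ih]
      · simp [bLcpLen, pvLcp, h]

theorem aInner_eq (s p : List Char) :
    aInner s p = if pvLcp p s = [] ∧ p ≠ [] then none else some (pvLcp p s) := by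
  induction p using aInner.induct (s := s) with
  | case1 p hsw =>
    rw [aInner, if_pos hsw]
    have hp : p <+: s := (PySem.Chars.startswith_iff s p).mp hsw
    rw [pvLcp_of_prefix hp]
    by_cases hnil : p = [] <;> simp [hnil]
  | case2 p hsw pl heq =>
    have hp' : PySem.List.slice p none (some (-1)) = [] := heq
    rw [aInner, if_neg hsw]
    show (if h : PySem.List.slice p none (some (-1)) = [] then none
          else aInner s (PySem.List.slice p none (some (-1)))) = _
    rw [dif_pos hp']
    have hnp : ¬ p <+: s := fun h => hsw ((PySem.Chars.startswith_iff s p).mpr h)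
    have hpn : p ≠ [] := by intro h; subst h; simp at hnp
    have hL0 : pvLcp p s = [] := by
      rw [← pvLcp_dropLast hnp, ← PySem.List.slice_to_neg_one, hp', pvLcp_nil_left]
    simp [hL0, hpn]
  | case3 p hsw pl hne ih =>
    have hne' : PySem.List.slice p none (some (-1)) ≠ [] := hne
    have ih' : aInner s (PySem.List.slice p none (some (-1))) =
        if pvLcp (PySem.List.slice p none (some (-1))) s = [] ∧
            PySem.List.slice p none (some (-1)) ≠ [] then none
        else some (pvLcp (PySem.List.slice p none (some (-1))) s) := ih
    rw [aInner, if_neg hsw]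
    show (if h : PySem.List.slice p none (some (-1)) = [] then none
          else aInner s (PySem.List.slice p none (some (-1)))) = _
    rw [dif_neg hne', ih']
    have hnp : ¬ p <+: s := fun h => hsw ((PySem.Chars.startswith_iff s p).mpr h)
    have hpn : p ≠ [] := by intro h; subst h; simp at hnp
    have hdl : pvLcp (PySem.List.slice p none (some (-1))) s = pvLcp p s := by
      rw [PySem.List.slice_to_neg_one]; exact pvLcp_dropLast hnp
    rw [hdl]
    simp [hpn, hne']

-- the prefix threaded through A's outer loop
def pvFold (p : List Char) (l : List String) : List Char :=
  l.foldl (fun q s => pvLcp q s.toList) p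

theorem pvFold_nil_state (l : List String) : pvFold [] l = [] := by
  induction l with
  | nil => rfl
  | cons s rest ih => simp [pvFold, List.foldl_cons, pvLcp_nil_left] at *; exact ih

theorem pvFold_prefix_init (p : List Char) (l : List String) : pvFold p l <+: p := by
  induction l generalizing p with
  | nil => exact List.prefix_rfl
  | cons s rest ih =>
    exact (ih (pvLcp p s.toList)).trans (pvLcp_prefix_left _ _)

theorem pvFold_prefix_mem {p : List Char} {l : List String} {s : String} (hs : s ∈ l) :
    pvFold p l <+: s.toList := by
  induction l generalizing p with
  | nil => simp at hs
  | cons t rest ih =>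
    rcases List.mem_cons.mp hs with h | h
    · subst h
      exact (pvFold_prefix_init (pvLcp p s.toList) rest).trans (pvLcp_prefix_right p s.toList)
    · exact ih h

theorem pvFold_greatest {q p : List Char} {l : List String}
    (hp : q <+: p) (hl : ∀ s ∈ l, q <+: s.toList) : q <+: pvFold p l := by
  induction l generalizing p with
  | nil => exact hp
  | cons s rest ih =>
    exact ih (pvLcp_greatest hp (hl s (by simp))) (fun t ht => hl t (by simp [ht]))

theorem aLoop_eq (l : List String) (p : List Char) :
    aLoop l p = if pvFold p l = [] ∧ p ≠ [] then none else some (pvFold p l) := by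
  induction l generalizing p with
  | nil => by_cases h : p = [] <;> simp [aLoop, pvFold, h]
  | cons s rest ih =>
    rw [aLoop, aInner_eq]
    by_cases hq : pvLcp p s.toList = [] ∧ p ≠ []
    · rw [if_pos hq]
      have hfe : pvFold p (s :: rest) = [] := by
        show pvFold (pvLcp p s.toList) rest = []
        rw [hq.1]; exact pvFold_nil_state rest
      simp [hfe, hq.2]
    · rw [if_neg hq]
      have hfold : pvFold p (s :: rest) = pvFold (pvLcp p s.toList) rest := rfl
      simp only [ih, hfold]
      rw [not_and_or, not_not] at hq
      by_cases hp : p = []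
      · subst hp
        have h0 : pvLcp ([] : List Char) s.toList = [] := pvLcp_nil_left _
        simp [h0, pvFold_nil_state]
      · have hq' : pvLcp p s.toList ≠ [] := hq.resolve_right hp
        simp [hq', hp]

theorem str_le_toList {s t : String} (h : s ≤ t) : s.toList ≤ t.toList :=
  String.le_iff_toList_le.mp h

-- any string lexicographically between a and b has their common prefix as a prefix
theorem pvBetweenLex {a s b : List Char} (h1 : List.Lex (· < ·) a s) (h2 : List.Lex (· < ·) s b) :
    pvLcp a b <+: s := by
  induction a generalizing s b with
  | nil => simp [pvLcp_nil_left]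
  | cons c as ih =>
    cases b with
    | nil => simp [pvLcp]
    | cons d bs =>
      by_cases hcd : c = d
      · subst hcd
        cases h1 with
        | cons h1' =>
          cases h2 with
          | cons h2' =>
            simp only [pvLcp, if_pos]
            exact (List.cons_prefix_cons).mpr ⟨rfl, ih h1' h2'⟩
          | rel hr => exact absurd hr (lt_irrefl _)
        | rel hr =>
          cases h2 with
          | cons h2' => exact absurd hr (lt_irrefl _)
          | rel hr2 => exact absurd (hr.trans hr2) (lt_irrefl _)
      · simp [pvLcp, hcd]

theorem pvBetween {a s b : List Char} (h1 : a ≤ s) (h2 : s ≤ b) : pvLcp a b <+: s := by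
  rcases lt_or_eq_of_le h1 with h1' | rfl
  · rcases lt_or_eq_of_le h2 with h2' | rfl
    · exact pvBetweenLex h1' h2'
    · exact pvLcp_prefix_right _ _
  · exact pvLcp_prefix_left _ _

theorem take_of_prefix {p l : List Char} (h : p <+: l) : l.take p.length = p :=
  (List.prefix_iff_eq_take.mp h).symm

-- ===== VERDICT (by name: the statement is the Claim_ definition above) =====
theorem get_common_prefix_and_removed_list_spec : Claim_equal_get_common_prefix_and_removed_list := by
  intro strs _
  unfold Spec_get_common_prefix_and_removed_list
  cases strs with
  | nil => rfl
  | cons s0 rest =>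
    -- B side names
    obtain ⟨lo, hlo⟩ : ∃ m, PySem.List.min? (s0 :: rest) (fun x => x) = some m := by
      rcases h : PySem.List.min? (s0 :: rest) (fun x : String => x) with _ | m
      · exact absurd ((PySem.List.min?_eq_none_iff _ _).mp h) (by simp)
      · exact ⟨m, rfl⟩
    obtain ⟨hi, hhi⟩ : ∃ m, PySem.List.max? (s0 :: rest) (fun x => x) = some m := by
      rcases h : PySem.List.max? (s0 :: rest) (fun x : String => x) with _ | m
      · exact absurd h (by simp [PySem.List.max?_eq_none_iff])
      · exact ⟨m, rfl⟩
    have hlomem : lo ∈ s0 :: rest := PySem.List.min?_mem hlo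
    have hhimem : hi ∈ s0 :: rest := PySem.List.max?_mem hhi
    have hlomin : ∀ y ∈ s0 :: rest, lo ≤ y := PySem.List.min?_isMin hlo
    have hhimax : ∀ y ∈ s0 :: rest, y ≤ hi := PySem.List.max?_isMax hhi
    set L := pvFold s0.toList (s0 :: rest) with hL
    -- the two common prefixes coincide
    have hBA : pvLcp lo.toList hi.toList = L := by
      have h1 : L <+: pvLcp lo.toList hi.toList :=
        pvLcp_greatest (pvFold_prefix_mem hlomem) (pvFold_prefix_mem hhimem)
      have h2 : pvLcp lo.toList hi.toList <+: L := by
        refine pvFold_greatest ?_ (fun s hs => ?_)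
        · exact pvBetween (str_le_toList (hlomin s0 (by simp))) (str_le_toList (hhimax s0 (by simp)))
        · exact pvBetween (str_le_toList (hlomin s (by simp [hs]))) (str_le_toList (hhimax s (by simp [hs])))
      exact h2.eq_of_length (Nat.le_antisymm h2.length_le h1.length_le)
    have hlen : bLcpLen lo.toList hi.toList = L.length := by rw [bLcpLen_eq, hBA]
    -- evaluate B
    have hB : get_common_prefix_and_removed_list_alt (s0 :: rest) =
        (String.ofList L,
         (s0 :: rest).map (fun s => String.ofList (s.toList.drop L.length))) := by
      simp only [get_common_prefix_and_removed_list_alt, hlo, hhi, Option.getD_some, hlen,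
        PySem.List.slice_to_natCast, PySem.List.slice_from_natCast]
      rw [take_of_prefix (by rw [← hBA]; exact pvLcp_prefix_left _ _)]
    rw [hB]
    -- evaluate A
    simp only [get_common_prefix_and_removed_list]
    rw [aLoop_eq, ← hL]
    by_cases hcase : L = [] ∧ s0.toList ≠ []
    · rw [if_pos hcase]
      simp [hcase.1]
    · rw [if_neg hcase]
      simp [PySem.List.slice_from_natCast]
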